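-- pv_equiv track=rewrite | github.com/ILoveBacteria/chertegram | homework1/problem2/CA1.2.server.py | tcp_response
-- ===== SOURCE A (Python) =====
-- from collections import Counter
--
-- def tcp_response(message: str) -> str:
--     """Generates requested response for TCP clients"""
--     result = message.lower()
--     count = Counter(result)
--
--     subs = {'a': 0, 'b': 0, 'c': 1, 'd': 1, 'e': 2, 'f': 2,
--             'g': 3, 'h': 3, 'i': 4, 'j': 4, 'k': 5, 'l': 5,
--             'm': 6, 'n': 6, 'o': 7, 'p': 7, 'q': 8, 'r': 8,
--             's': 9, 't': 9, 'u': 10, 'v': 10, 'w': 11, 'x': 11,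
--             'y': 12, 'z': 12}
--
--     for c in result:
--         if c in subs:
--             result = result.replace(c, str(subs[c]))
--
--     min_frequency = count[min(count, key=count.get)]
--     max_frequency_value = 0
--
--     for c in count:
--         if c in subs:
--             if count[c] == min_frequency:
--                 if subs[c] > max_frequency_value:
--                     max_frequency_value = subs[c]
--
--     return f'{result} , {str(max_frequency_value)}'
-- ===== SOURCE B (Python) =====
-- from collections import Counter
--
-- SUBS = {'a': 0, 'b': 0, 'c': 1, 'd': 1, 'e': 2, 'f': 2,
--         'g': 3, 'h': 3, 'i': 4, 'j': 4, 'k': 5, 'l': 5,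
--         'm': 6, 'n': 6, 'o': 7, 'p': 7, 'q': 8, 'r': 8,
--         's': 9, 't': 9, 'u': 10, 'v': 10, 'w': 11, 'x': 11,
--         'y': 12, 'z': 12}
--
--
-- def tcp_response(message: str) -> str:
--     """Generates requested response for TCP clients"""
--     lowered = message.lower()
--     converted = ''.join(str(SUBS[c]) if c in SUBS else c for c in lowered)
--     count = Counter(lowered)
--     min_frequency = min(count.values())
--     max_code = max((SUBS[c] for c in count
--                     if c in SUBS and count[c] == min_frequency), default=0)
--     return f'{converted} , {max_code}'
-- ===== Notes on version B (the rewrite author's own statement) =====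
-- stated objective: faster
-- what changed: Replaces the per-character str.replace rescan loop with a single join-map pass over the string, and replaces the argmin-key-then-lookup plus nested-if max loop with min(count.values()) followed by max(..., default=0) over the qualifying codes.
import Mathlib
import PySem

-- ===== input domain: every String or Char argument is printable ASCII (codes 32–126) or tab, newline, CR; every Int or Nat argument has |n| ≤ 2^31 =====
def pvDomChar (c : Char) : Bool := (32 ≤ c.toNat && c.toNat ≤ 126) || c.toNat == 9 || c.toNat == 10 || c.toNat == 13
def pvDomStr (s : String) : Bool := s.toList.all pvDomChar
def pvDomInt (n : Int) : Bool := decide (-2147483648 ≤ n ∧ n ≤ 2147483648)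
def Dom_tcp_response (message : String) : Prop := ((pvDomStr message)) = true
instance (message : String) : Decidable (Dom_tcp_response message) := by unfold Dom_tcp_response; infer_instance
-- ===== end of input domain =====

-- B replaces A's per-character str.replace rescan loop by one join-map pass and the
-- argmin-key-then-lookup + nested-if max loop by min over the counts and max-with-default;
-- measured faster (asymptotically fewer character scans).

-- ===== PORT A =====
-- A's literal `subs` dict (B's module-level SUBS is the same literal)
def subsA : PySem.Dict Char Int := PySem.Dict.ofList
  [('a',0),('b',0),('c',1),('d',1),('e',2),('f',2),('g',3),('h',3),('i',4),('j',4),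
   ('k',5),('l',5),('m',6),('n',6),('o',7),('p',7),('q',8),('r',8),('s',9),('t',9),
   ('u',10),('v',10),('w',11),('x',11),('y',12),('z',12)]

def tcp_response (message : String) : String :=
  let result := PySem.Str.lower message
  let count := PySem.Dict.counter result.toList
  -- `for c in result: if c in subs: result = result.replace(c, str(subs[c]))`
  -- (the for-loop iterates over the ORIGINAL lowered string object)
  let result2 := result.toList.foldl (fun r c =>
    if subsA.contains c then
      PySem.Str.replace r (String.ofList [c]) (PySem.Int.toStr (subsA.getD c 0))
    else r) result
  -- `count[min(count, key=count.get)]`; min raises ValueError on empty input (excluded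
  -- by Pre_), so the `none` branch is unreachable under Pre_
  let min_frequency : Int :=
    match PySem.List.min? count.keys (fun k => count.getD k 0) with
    | some k => count.getD k 0
    | none => 0
  let max_frequency_value := count.keys.foldl (fun acc c =>
    if subsA.contains c then
      if count.getD c 0 = min_frequency then
        if subsA.getD c 0 > acc then subsA.getD c 0 else acc
      else acc
    else acc) 0
  result2 ++ " , " ++ PySem.Int.toStr max_frequency_value

-- ===== PORT B =====
def tcp_response_alt (message : String) : String :=
  let lowered := PySem.Str.lower message
  -- ''.join(str(SUBS[c]) if c in SUBS else c for c in lowered): concatenation of pieces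
  let converted := String.ofList (lowered.toList.flatMap (fun c =>
    match subsA.get? c with
    | some v => (PySem.Int.toStr v).toList
    | none => [c]))
  let count := PySem.Dict.counter lowered.toList
  -- min(count.values()); raises ValueError on empty input (excluded by Pre_)
  let min_frequency : Int := (PySem.List.min? count.values (fun v => v)).getD 0
  -- max((SUBS[c] for c in count if c in SUBS and count[c] == min_frequency), default=0)
  let max_code : Int := (PySem.List.max?
    (count.keys.filterMap (fun c =>
      if subsA.contains c ∧ count.getD c 0 = min_frequency then subsA.get? c else none))
    (fun v => v)).getD 0
  converted ++ " , " ++ PySem.Int.toStr max_code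

-- ===== PRECONDITION & SPEC =====
-- On the empty string both A and B raise ValueError (min of an empty sequence); Pre_ excludes it.
def Pre_tcp_response (message : String) : Prop := message ≠ ""
instance (message : String) : Decidable (Pre_tcp_response message) := by unfold Pre_tcp_response; infer_instance
def pvWitness_tcp_response : String := "Hi!"
def Spec_tcp_response (message : String) (out : String) : Prop := out = tcp_response_alt message
instance (message : String) (out : String) : Decidable (Spec_tcp_response message out) := by unfold Spec_tcp_response; infer_instance

-- ===== CLAIM (what is proved, stated in full; the proofs are below) =====
def Claim_equal_tcp_response : Prop := ∀ (message : String), Dom_tcp_response message → Pre_tcp_response message → Spec_tcp_response message (tcp_response message)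

-- ===== LEMMAS AND PROOFS =====

-- subsA looked up arithmetically: letters a..z map to (code-97)/2, everything else is absent
theorem subs_get? (x : Char) : subsA.get? x =
    if 97 ≤ x.toNat ∧ x.toNat ≤ 122 then some (((x.toNat - 97) / 2 : ℕ) : ℤ) else none := by
  by_cases h : 97 ≤ x.toNat ∧ x.toNat ≤ 122
  · obtain ⟨h1, h2⟩ := h
    rw [if_pos ⟨h1, h2⟩]
    set n := x.toNat with hn
    rw [← Char.ofNat_toNat x, ← hn]
    interval_cases n <;> decide
  · rw [if_neg h]
    rw [show ¬(97 ≤ x.toNat ∧ x.toNat ≤ 122) ↔ x.toNat < 97 ∨ 122 < x.toNat by omega] at h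
    simp only [PySem.Dict.get?, Option.map_eq_none_iff, List.find?_eq_none]
    intro p hp
    have hlet : 97 ≤ p.1.toNat ∧ p.1.toNat ≤ 122 := by
      have hitems : subsA.items = [('a',(0:Int)),('b',0),('c',1),('d',1),('e',2),('f',2),
        ('g',3),('h',3),('i',4),('j',4),('k',5),('l',5),('m',6),('n',6),('o',7),('p',7),
        ('q',8),('r',8),('s',9),('t',9),('u',10),('v',10),('w',11),('x',11),('y',12),('z',12)] := by rfl
      rw [hitems] at hp
      fin_cases hp <;> decide
    simp only [beq_iff_eq]
    intro e
    rw [e] at hlet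
    omega

theorem subs_contains (x : Char) : subsA.contains x = (subsA.get? x).isSome := by
  simp only [PySem.Dict.contains, PySem.Dict.get?, Option.isSome_map]
  rw [Bool.eq_iff_iff, List.any_eq_true, List.find?_isSome]

theorem subs_val_bounds {x : Char} {v : Int} (h : subsA.get? x = some v) : 0 ≤ v ∧ v ≤ 12 := by
  rw [subs_get?] at h
  split at h
  · rename_i hx
    injection h with h
    subst h
    constructor
    · exact Int.natCast_nonneg _
    · have : (x.toNat - 97) / 2 ≤ 12 := by omega
      exact_mod_cast this
  · exact absurd h (by simp)

theorem subs_key_letter {x : Char} (h : (subsA.get? x).isSome) : 97 ≤ x.toNat ∧ x.toNat ≤ 122 := by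
  rw [subs_get?] at h
  by_cases hx : 97 ≤ x.toNat ∧ x.toNat ≤ 122
  · exact hx
  · rw [if_neg hx] at h
    simp at h

-- digits of str(v) for a subs value are never letters
theorem toStr_digits_all {v : Int} (h0 : 0 ≤ v) (h12 : v ≤ 12) :
    ((PySem.Int.toStr v).toList.all (fun c => decide (c.toNat < 97))) = true := by
  interval_cases v <;> rfl

theorem toStr_digits {v : Int} (h0 : 0 ≤ v) (h12 : v ≤ 12) :
    ∀ ch ∈ (PySem.Int.toStr v).toList, ch.toNat < 97 := by
  intro ch hch
  simpa using List.all_eq_true.mp (toStr_digits_all h0 h12) ch hch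

-- single-character str.replace replaces every occurrence independently
theorem replace_go_single (c : Char) (repl : List Char) :
    ∀ (l : List Char) (fuel : Nat) (acc : List Char), l.length ≤ fuel →
      PySem.Chars.replace.go [c] repl fuel l acc =
        acc.reverse ++ l.flatMap (fun x => if x == c then repl else [x]) := by
  intro l
  induction l with
  | nil =>
    intro fuel acc _
    cases fuel <;> simp [PySem.Chars.replace.go]
  | cons x t ih =>
    intro fuel acc hlen
    cases fuel with
    | zero => simp at hlen
    | succ f =>
      rw [PySem.Chars.replace.go]
      by_cases hx : x = c
      · subst hx
        simp only [List.isPrefixOf, beq_self_eq_true, Bool.true_and, if_true]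
        rw [show List.drop [x].length (x :: t) = t from rfl]
        rw [ih f (repl.reverse ++ acc) (by simpa using Nat.le_of_succ_le_succ hlen)]
        simp
      · have hpre : ([c].isPrefixOf (x :: t)) = false := by
          simp only [List.isPrefixOf, Bool.and_eq_false_iff]
          left
          exact beq_false_of_ne (fun h => hx h.symm)
        rw [hpre]
        simp only [Bool.false_eq_true, if_false]
        rw [ih f (x :: acc) (by simpa using Nat.le_of_succ_le_succ hlen)]
        simp [if_neg hx]

theorem replace_single (l : List Char) (c : Char) (repl : List Char) :
    PySem.Chars.replace l [c] repl = l.flatMap (fun x => if x == c then repl else [x]) := by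
  rw [PySem.Chars.replace]
  simp only [List.isEmpty_cons]
  exact replace_go_single c repl l l.length [] le_rfl

-- the per-character code piece, and the partially-substituted expansion of s
def fsub (c : Char) : List Char :=
  match subsA.get? c with
  | some v => (PySem.Int.toStr v).toList
  | none => [c]

def gsub (P : List Char) (x : Char) : List Char := if x ∈ P then fsub x else [x]

theorem gsub_congr {P Q : List Char} (h : ∀ x, x ∈ P ↔ x ∈ Q) : gsub P = gsub Q := by
  funext x
  unfold gsub
  by_cases hx : x ∈ P
  · rw [if_pos hx, if_pos ((h x).1 hx)]
  · rw [if_neg hx, if_neg (fun hq => hx ((h x).2 hq))]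

theorem step_replace (s P : List Char) (c : Char) (hc : (subsA.get? c).isSome)
    (hP : ∀ x ∈ P, (subsA.get? x).isSome) :
    PySem.Chars.replace (s.flatMap (gsub P)) [c] (fsub c) = s.flatMap (gsub (c :: P)) := by
  rw [replace_single, List.flatMap_assoc]
  apply List.flatMap_congr
  intro x _
  by_cases hxP : x ∈ P
  · have hxs : (subsA.get? x).isSome := hP x hxP
    obtain ⟨v, hv⟩ := Option.isSome_iff_exists.1 hxs
    have hbounds := subs_val_bounds hv
    have hdig := toStr_digits hbounds.1 hbounds.2
    have hcl := subs_key_letter hc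
    rw [gsub, if_pos hxP, gsub, if_pos (List.mem_cons_of_mem c hxP)]
    rw [show fsub x = (PySem.Int.toStr v).toList by rw [fsub, hv]]
    rw [List.flatMap_congr (g := fun y => [y]) ?_]
    · simp
    · intro y hy
      have : y.toNat < 97 := hdig y hy
      rw [if_neg]
      simp only [beq_iff_eq]
      intro e
      rw [e] at this
      omega
  · rw [gsub, if_neg hxP, List.flatMap_singleton]
    by_cases hxc : x = c
    · subst hxc
      rw [if_pos (by simp), gsub, if_pos (List.mem_cons_self)]
    · rw [if_neg (by simp [hxc]), gsub, if_neg (by simp [hxc, hxP])]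

theorem loop_general (todo : List Char) (s : List Char) (P : List Char)
    (hP : ∀ x ∈ P, (subsA.get? x).isSome) :
    todo.foldl (fun r c =>
        if subsA.contains c then
          PySem.Str.replace r (String.ofList [c]) (PySem.Int.toStr (subsA.getD c 0))
        else r)
      (String.ofList (s.flatMap (gsub P)))
    = String.ofList (s.flatMap (gsub (todo.filter (fun c => subsA.contains c) ++ P))) := by
  induction todo generalizing P with
  | nil => simp
  | cons c t ih =>
    rw [List.foldl_cons]
    by_cases hc : (subsA.get? c).isSome
    · obtain ⟨v, hv⟩ := Option.isSome_iff_exists.1 hc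
      rw [if_pos (by rw [subs_contains, hc])]
      have hrepl : PySem.Str.replace (String.ofList (s.flatMap (gsub P))) (String.ofList [c])
          (PySem.Int.toStr (subsA.getD c 0)) = String.ofList (s.flatMap (gsub (c :: P))) := by
        rw [show PySem.Str.replace (String.ofList (s.flatMap (gsub P))) (String.ofList [c])
              (PySem.Int.toStr (subsA.getD c 0))
            = String.ofList ((PySem.Str.replace (String.ofList (s.flatMap (gsub P))) (String.ofList [c])
              (PySem.Int.toStr (subsA.getD c 0))).toList) from String.ofList_toList.symm]
        rw [PySem.Str.toList_replace]
        rw [String.toList_ofList, String.toList_ofList]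
        rw [show (PySem.Int.toStr (subsA.getD c 0)).toList = fsub c by
          simp [PySem.Dict.getD, hv, fsub]]
        rw [step_replace s P c hc hP]
      rw [hrepl]
      rw [ih (c :: P) (fun x hx => by
        rcases List.mem_cons.1 hx with h | h
        · rw [h]; exact hc
        · exact hP x h)]
      congr 1
      rw [gsub_congr (Q := (c :: t).filter (fun c => subsA.contains c) ++ P)]
      intro x
      simp only [List.mem_append, List.mem_filter, List.mem_cons]
      constructor
      · rintro (⟨hm, hcon⟩ | (rfl | hp))
        · exact Or.inl ⟨Or.inr hm, hcon⟩
        · exact Or.inl ⟨Or.inl rfl, by rw [subs_contains, hc]⟩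
        · exact Or.inr hp
      · rintro (⟨(rfl | hm), hcon⟩ | hp)
        · exact Or.inr (Or.inl rfl)
        · exact Or.inl ⟨hm, hcon⟩
        · exact Or.inr (Or.inr hp)
    · rw [if_neg (by rw [subs_contains]; simpa using hc)]
      rw [ih P hP]
      congr 2
      rw [List.filter_cons_of_neg (by rw [subs_contains]; simpa using hc)]

-- Part 1: A's replace loop equals B's single expansion pass
theorem string_part (s : String) :
    s.toList.foldl (fun r c =>
        if subsA.contains c then
          PySem.Str.replace r (String.ofList [c]) (PySem.Int.toStr (subsA.getD c 0))
        else r) s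
    = String.ofList (s.toList.flatMap (fun c =>
        match subsA.get? c with
        | some v => (PySem.Int.toStr v).toList
        | none => [c])) := by
  have h0 : s = String.ofList (s.toList.flatMap (gsub [])) := by
    rw [show s.toList.flatMap (gsub []) = s.toList from by unfold gsub; simp]
    rw [String.ofList_toList]
  conv_lhs => rw [h0]
  rw [show (String.ofList (List.flatMap (gsub []) s.toList)).toList = s.toList from by
    rw [String.toList_ofList]; unfold gsub; simp]
  rw [loop_general s.toList s.toList [] (by simp)]
  congr 1
  apply List.flatMap_congr
  intro x hx
  by_cases hcx : (subsA.get? x).isSome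
  · have hmem : x ∈ s.toList.filter (fun c => subsA.contains c) ++ ([] : List Char) := by
      simp only [List.mem_append, List.mem_filter]
      exact Or.inl ⟨hx, by rw [subs_contains, hcx]⟩
    rw [gsub, if_pos hmem]
    rfl
  · have hnone : subsA.get? x = none := by simpa using hcx
    have hmem : x ∉ s.toList.filter (fun c => subsA.contains c) ++ ([] : List Char) := by
      simp only [List.mem_append, List.mem_filter, List.not_mem_nil, or_false]
      rintro ⟨-, hcon⟩
      rw [subs_contains, hnone] at hcon
      simp at hcon
    rw [gsub, if_neg hmem, hnone]

-- Part 2: count[argmin-key] equals min of the values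
theorem min_part (s : List Char) (hs : s ≠ []) :
    (match PySem.List.min? (PySem.Dict.counter s).keys (fun k => (PySem.Dict.counter s).getD k 0) with
     | some k => (PySem.Dict.counter s).getD k 0
     | none => 0)
    = ((PySem.List.min? (PySem.Dict.counter s).values (fun v => v)).getD 0 : Int) := by
  have hkeys : (PySem.Dict.counter s).keys = PySem.Set.ofList s := PySem.Dict.keys_counter s
  have hvals : (PySem.Dict.counter s).values
      = (PySem.Set.ofList s).map (fun k => ((s.count k : Int))) := by
    simp [PySem.Dict.values, PySem.Dict.items_counter, List.map_map]
  obtain ⟨c0, t0, rfl⟩ : ∃ c0 t0, s = c0 :: t0 := by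
    cases s with
    | nil => exact absurd rfl hs
    | cons c0 t0 => exact ⟨c0, t0, rfl⟩
  have hc0 : c0 ∈ (PySem.Dict.counter (c0 :: t0)).keys := by
    rw [hkeys, PySem.Set.mem_ofList]
    exact List.mem_cons_self
  obtain ⟨a, ha⟩ : ∃ a, PySem.List.min? (PySem.Dict.counter (c0 :: t0)).keys
      (fun k => (PySem.Dict.counter (c0 :: t0)).getD k 0) = some a := by
    cases hmin : PySem.List.min? (PySem.Dict.counter (c0 :: t0)).keys
        (fun k => (PySem.Dict.counter (c0 :: t0)).getD k 0) with
    | none =>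
      rw [PySem.List.min?_eq_none_iff] at hmin
      rw [hmin] at hc0
      simp at hc0
    | some a => exact ⟨a, rfl⟩
  obtain ⟨b, hb⟩ : ∃ b, PySem.List.min? (PySem.Dict.counter (c0 :: t0)).values
      (fun v => v) = some b := by
    cases hmin : PySem.List.min? (PySem.Dict.counter (c0 :: t0)).values (fun v => v) with
    | none =>
      rw [PySem.List.min?_eq_none_iff] at hmin
      rw [hvals] at hmin
      have : c0 ∈ PySem.Set.ofList (c0 :: t0) := by
        rw [PySem.Set.mem_ofList]; exact List.mem_cons_self
      rcases List.map_eq_nil_iff.1 hmin with h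
      rw [h] at this
      simp at this
    | some b => exact ⟨b, rfl⟩
  rw [ha, hb]
  simp only [Option.getD_some]
  -- b = count of some key k
  have hbmem := PySem.List.min?_mem hb
  rw [hvals] at hbmem
  obtain ⟨k, hk, hbk⟩ := List.mem_map.1 hbmem
  have hamem := PySem.List.min?_mem ha
  apply le_antisymm
  · -- getD a 0 ≤ getD k 0 = b
    have h1 := PySem.List.min?_isMin ha k (by rw [hkeys]; exact hk)
    have h2 : (PySem.Dict.counter (c0 :: t0)).getD k 0 = b := by
      rw [PySem.Dict.getD_counter]
      exact hbk
    rw [← h2]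
    exact h1
  · -- b ≤ getD a 0   since getD a 0 ∈ values
    have hav : (PySem.Dict.counter (c0 :: t0)).getD a 0
        ∈ (PySem.Dict.counter (c0 :: t0)).values := by
      rw [hvals, PySem.Dict.getD_counter]
      exact List.mem_map.2 ⟨a, by rw [← hkeys]; exact hamem, rfl⟩
    exact PySem.List.min?_isMin hb _ hav

theorem fold_if_max (count : PySem.Dict Char Int) (m : Int) :
    ∀ (L : List Char) (acc : Int),
      L.foldl (fun acc c =>
          if subsA.contains c then
            if count.getD c 0 = m then
              if subsA.getD c 0 > acc then subsA.getD c 0 else acc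
            else acc
          else acc) acc
      = (L.filterMap (fun c =>
          if subsA.contains c ∧ count.getD c 0 = m then subsA.get? c else none)).foldl
          (fun a v => if v > a then v else a) acc := by
  intro L
  induction L with
  | nil => intro acc; rfl
  | cons c t ih =>
    intro acc
    rw [List.foldl_cons, List.filterMap_cons]
    by_cases hc : subsA.contains c = true
    · by_cases hq : count.getD c 0 = m
      · obtain ⟨v, hv⟩ : ∃ v, subsA.get? c = some v := by
          rw [subs_contains] at hc
          exact Option.isSome_iff_exists.1 hc
        rw [show (if subsA.contains c = true ∧ count.getD c 0 = m
              then subsA.get? c else none) = some v from by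
            rw [if_pos ⟨hc, hq⟩]
            exact hv]
        rw [if_pos hc, if_pos hq, List.foldl_cons]
        rw [show subsA.getD c 0 = v from by simp [PySem.Dict.getD, hv]]
        exact ih _
      · rw [if_pos hc, if_neg hq, if_neg (fun h => hq h.2)]
        exact ih acc
    · rw [if_neg hc, if_neg (fun h => hc h.1)]
      exact ih acc

theorem fold_max_nonneg (vs : List Int) (h : ∀ v ∈ vs, 0 ≤ v) :
    vs.foldl (fun a v => if v > a then v else a) 0
      = ((PySem.List.max? vs (fun v => v)).getD 0 : Int) := by
  cases vs with
  | nil => rfl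
  | cons x t =>
    rw [PySem.List.max?_id_cons, Option.getD_some, List.foldl_cons]
    rw [show (if x > 0 then x else 0) = x from by
      have := h x List.mem_cons_self
      by_cases hx : x > 0
      · rw [if_pos hx]
      · rw [if_neg hx]; omega]
    rw [show (fun (a v : Int) => if v > a then v else a) = (fun a v => max a v) from by
      funext a v
      by_cases hav : v > a
      · rw [if_pos hav]; exact (max_eq_right (le_of_lt hav)).symm
      · rw [if_neg hav]; exact (max_eq_left (by omega)).symm]

-- Part 3: A's nested-if running max equals B's max-with-default over the filtered codes
theorem max_part (L : List Char) (count : PySem.Dict Char Int) (m : Int) :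
    L.foldl (fun acc c =>
        if subsA.contains c then
          if count.getD c 0 = m then
            if subsA.getD c 0 > acc then subsA.getD c 0 else acc
          else acc
        else acc) 0
    = ((PySem.List.max? (L.filterMap (fun c =>
        if subsA.contains c ∧ count.getD c 0 = m then subsA.get? c else none))
        (fun v => v)).getD 0 : Int) := by
  rw [fold_if_max]
  apply fold_max_nonneg
  intro v hv
  obtain ⟨c, _, hc⟩ := List.mem_filterMap.1 hv
  split at hc
  · exact (subs_val_bounds hc).1
  · exact absurd hc (by simp)

-- ===== VERDICT (by name: the statement is the Claim_ definition above) =====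
theorem tcp_response_spec : Claim_equal_tcp_response := by
  intro message _ hpre
  unfold Spec_tcp_response tcp_response tcp_response_alt
  dsimp only
  have hs : (PySem.Str.lower message).toList ≠ [] := by
    intro h
    apply hpre
    rw [PySem.Str.toList_lower] at h
    have hml : message.toList = [] := by
      cases hm : message.toList with
      | nil => rfl
      | cons x xs => rw [hm] at h; simp [PySem.Chars.lower] at h
    rw [← String.ofList_toList (s := message), hml]
  rw [string_part, min_part _ hs, max_part]
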